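-- pv_equiv track=rewrite | github.com/TironIlya/python_pl_task | task1/task1.py | circular_path
-- ===== SOURCE A (Python) =====
-- def circular_path(n, m):
--
--     circular_array = list(range(1, n + 1))
--
--     path = []
--     current_position = 0
--     visited_positions = set()
--
--     while current_position not in visited_positions:
--
--         path.append(circular_array[current_position])
--         visited_positions.add(current_position)
--
--         current_position = (current_position + m - 1) % n
--
--     return path
-- ===== SOURCE B (Python) =====
-- import math
--
--
-- def circular_path(n, m):
--     # Closed form: the walk adds step=(m-1)%n each time; the orbit of 0 has
--     # length n // gcd(n, step), so generate it directly.
--     step = (m - 1) % n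
--     length = n // math.gcd(n, step)
--     return [(i * step) % n + 1 for i in range(length)]
-- ===== Notes on version B (the rewrite author's own statement) =====
-- stated objective: simpler
-- what changed: Replaced the visited-set walk (and the materialised list(range(1,n+1))) by a closed form: cycle length L = n // gcd(n,(m-1)%n) and direct generation [(i*(m-1))%n + 1 for i in range(L)].
import Mathlib
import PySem

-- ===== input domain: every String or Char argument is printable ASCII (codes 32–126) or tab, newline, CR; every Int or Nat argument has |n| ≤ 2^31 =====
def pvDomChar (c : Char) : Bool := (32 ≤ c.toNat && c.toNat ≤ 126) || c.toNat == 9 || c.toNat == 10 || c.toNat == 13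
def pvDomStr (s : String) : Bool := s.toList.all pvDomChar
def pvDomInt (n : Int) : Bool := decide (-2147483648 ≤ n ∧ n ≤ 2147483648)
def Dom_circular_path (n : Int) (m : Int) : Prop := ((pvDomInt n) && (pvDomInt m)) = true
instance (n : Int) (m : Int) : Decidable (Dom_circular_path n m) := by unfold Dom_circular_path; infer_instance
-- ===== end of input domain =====

-- B replaces A's visited-set walk by the closed-form orbit (cycle length n // gcd(n, (m-1) % n)); objective: simpler.


-- ===== PORT A =====
-- the while loop of A, with fuel (n.toNat + 1 suffices: each iteration adds a new position to visited);
-- the `none` branch is Python's IndexError (only reachable for n ≤ 0, outside Pre_)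
def cpLoop (arr : List Int) (n : Int) (m : Int) :
    Nat → List Int → Int → PySem.Set Int → List Int
  | 0, path, _, _ => path
  | fuel + 1, path, pos, visited =>
    if PySem.Set.contains visited pos then path
    else
      match PySem.List.pyGet? arr pos with
      | none => path
      | some v =>
        cpLoop arr n m fuel (path ++ [v]) (PySem.Int.mod (pos + m - 1) n)
          (PySem.Set.add visited pos)

def circular_path (n : Int) (m : Int) : List Int :=
  let circular_array := PySem.List.pyRange 1 (n + 1) 1
  cpLoop circular_array n m (n.toNat + 1) [] 0 PySem.Set.empty

-- ===== PORT B =====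
def circular_path_alt (n : Int) (m : Int) : List Int :=
  let step := PySem.Int.mod (m - 1) n
  let length := PySem.Int.floordiv n ((Int.gcd n step : Nat) : Int)
  (PySem.List.pyRange 0 length 1).map (fun i => PySem.Int.mod (i * step) n + 1)

-- ===== PRECONDITION & SPEC =====
-- Pre_ excludes exactly n ≤ 0, where A raises IndexError on circular_array[0].
def Pre_circular_path (n : Int) (m : Int) : Prop := 1 ≤ n
instance (n : Int) (m : Int) : Decidable (Pre_circular_path n m) := by unfold Pre_circular_path; infer_instance
def pvWitness_circular_path : Int × Int := (5, 2)

def Spec_circular_path (n : Int) (m : Int) (out : List Int) : Prop := out = circular_path_alt n m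
instance (n : Int) (m : Int) (out : List Int) : Decidable (Spec_circular_path n m out) := by unfold Spec_circular_path; infer_instance

-- ===== CLAIM (what is proved, stated in full; the proofs are below) =====
def Claim_equal_circular_path : Prop := ∀ (n : Int) (m : Int), Dom_circular_path n m → Pre_circular_path n m → Spec_circular_path n m (circular_path n m)

-- ===== LEMMAS AND PROOFS =====

-- the loop invariant: after k iterations of A's while loop, path/pos/visited are the closed-form orbit prefix
theorem cpLoop_inv (n m d : Int) (Lnat : Nat)
    (hn : 0 < n)
    (hd : d = (m - 1) % n)
    (hL1 : 1 ≤ Lnat)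
    (hcyc : ((Lnat : Int) * d) % n = 0)
    (hinj : forall i j : Nat, i < j → j < Lnat → ((i : Int) * d) % n ≠ ((j : Int) * d) % n) :
    forall (fuel k : Nat), k ≤ Lnat → Lnat - k < fuel →
      cpLoop (PySem.List.pyRange 1 (n + 1) 1) n m fuel
        ((List.range k).map (fun i : Nat => ((i : Int) * d) % n + 1))
        (((k : Int)) * d % n)
        ((List.range k).map (fun i : Nat => ((i : Int) * d) % n))
      = (List.range Lnat).map (fun i : Nat => ((i : Int) * d) % n + 1) := by
  intro fuel
  induction fuel with
  | zero => intro k hk hf; omega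
  | succ fuel ih =>
    intro k hk hf
    by_cases hkL : k = Lnat
    · -- exit: pos = f Lnat = 0 = f 0 is already in visited
      rw [hkL]
      have hmem : ((Lnat : Int) * d) % n ∈
          (List.range Lnat).map (fun i : Nat => ((i : Int) * d) % n) := by
        rw [hcyc]
        exact List.mem_map.2 ⟨0, List.mem_range.2 (by omega), by simp⟩
      rw [cpLoop, if_pos ((PySem.Set.contains_iff _ _).2 hmem)]
    · -- step: pos = f k is fresh, arr[pos] = pos + 1, next pos = f (k+1)
      have hkL' : k < Lnat := lt_of_le_of_ne hk hkL
      have hfresh : ((k : Int) * d) % n ∉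
          (List.range k).map (fun i : Nat => ((i : Int) * d) % n) := by
        intro hmem
        obtain ⟨i, hi, hEq⟩ := List.mem_map.1 hmem
        exact hinj i k (List.mem_range.1 hi) hkL' hEq
      have hpos0 : 0 ≤ (k : Int) * d % n := Int.emod_nonneg _ (by omega)
      have hposn : (k : Int) * d % n < n := Int.emod_lt_of_pos _ hn
      have hget : PySem.List.pyGet? (PySem.List.pyRange 1 (n + 1) 1) ((k : Int) * d % n)
          = some ((k : Int) * d % n + 1) := by
        rw [PySem.List.pyGet?_of_nonneg _ hpos0]
        rw [List.getElem?_eq_getElem (by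
          rw [PySem.List.length_pyRange_one]; omega)]
        rw [PySem.List.getElem_pyRange_one]
        congr 1
        omega
      have hcontains : PySem.Set.contains
          ((List.range k).map (fun i : Nat => ((i : Int) * d) % n)) ((k : Int) * d % n) = false := by
        apply Bool.eq_false_iff.mpr
        intro h
        exact hfresh ((PySem.Set.contains_iff _ _).1 h)
      rw [cpLoop, hcontains]
      simp only [Bool.false_eq_true, if_false, hget]
      have hnext : PySem.Int.mod ((k : Int) * d % n + m - 1) n = (((k : Int) + 1) * d) % n := by
        rw [PySem.Int.mod_eq_emod_of_pos hn]
        rw [show (k : Int) * d % n + m - 1 = (k : Int) * d % n + (m - 1) from by ring]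
        rw [Int.emod_add_emod, ← Int.add_emod_emod ((k : Int) * d) (m - 1) n, ← hd]
        rw [show (k : Int) * d + d = ((k : Int) + 1) * d from by ring]
      have hadd : PySem.Set.add ((List.range k).map (fun i : Nat => ((i : Int) * d) % n))
          ((k : Int) * d % n)
          = (List.range (k + 1)).map (fun i : Nat => ((i : Int) * d) % n) := by
        rw [PySem.Set.add_of_not_mem hfresh, List.range_succ, List.map_append]
        simp
      have hpath : ((List.range k).map (fun i : Nat => ((i : Int) * d) % n + 1)) ++ [(k : Int) * d % n + 1]
          = (List.range (k + 1)).map (fun i : Nat => ((i : Int) * d) % n + 1) := by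
        rw [List.range_succ, List.map_append]
        simp
      rw [hpath, hnext, hadd]
      exact ih (k + 1) (by omega) (by omega)

-- ===== VERDICT (by name: the statement is the Claim_ definition above) =====
theorem circular_path_spec : Claim_equal_circular_path := by
  intro n m _ hpre
  have hn : 0 < n := hpre
  show circular_path n m = circular_path_alt n m
  show cpLoop (PySem.List.pyRange 1 (n + 1) 1) n m (n.toNat + 1) [] 0 PySem.Set.empty
      = (PySem.List.pyRange 0
          (PySem.Int.floordiv n ((Int.gcd n (PySem.Int.mod (m - 1) n) : Nat) : Int)) 1).map
          (fun i => PySem.Int.mod (i * PySem.Int.mod (m - 1) n) n + 1)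
  simp only [PySem.Int.mod_eq_emod_of_pos hn]
  set d : Int := (m - 1) % n with hd
  have hd0 : 0 ≤ d := Int.emod_nonneg _ (by omega)
  have hdn : d < n := Int.emod_lt_of_pos _ hn
  set g : Int := ((Int.gcd n d : Nat) : Int) with hg
  have hgpos : 0 < g := by
    rw [hg]
    exact_mod_cast Int.gcd_pos_iff.2 (Or.inl (by omega))
  have hgn : g ∣ n := by rw [hg]; exact Int.gcd_dvd_left n d
  have hgd : g ∣ d := by rw [hg]; exact Int.gcd_dvd_right n d
  set L : Int := n / g with hL
  have hL1 : 1 ≤ L := (Int.le_ediv_iff_mul_le hgpos).2 (by rw [one_mul]; exact Int.le_of_dvd hn hgn)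
  have hLn : L ≤ n := Int.ediv_le_self _ (by omega)
  have hcyc : (L * d) % n = 0 := by
    apply Int.emod_eq_zero_of_dvd
    obtain ⟨d', hd'⟩ := hgd
    refine ⟨d', ?_⟩
    calc L * d = n / g * (g * d') := by rw [← hd']
    _ = (n / g * g) * d' := by ring
    _ = n * d' := by rw [Int.ediv_mul_cancel hgn]
  have hinj : forall i j : Nat, i < j → (j : Int) < L →
      ((i : Int) * d) % n ≠ ((j : Int) * d) % n := by
    intro i j hij hjL hEq
    have hdvd : n ∣ (j : Int) * d - (i : Int) * d := Int.ModEq.dvd hEq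
    rw [show (j : Int) * d - (i : Int) * d = ((j : Int) - i) * d from by ring] at hdvd
    obtain ⟨d', hd'⟩ := hgd
    obtain ⟨n', hn'⟩ := hgn
    have hLn' : L = n' := by rw [hL, hn', Int.mul_ediv_cancel_left _ hgpos.ne']
    have hdvd' : n' ∣ ((j : Int) - i) * d' := by
      rcases hdvd with ⟨c, hc⟩
      refine ⟨c, ?_⟩
      apply mul_left_cancel₀ hgpos.ne'
      calc g * (((j : Int) - i) * d') = ((j : Int) - i) * d := by rw [hd']; ring
      _ = n * c := hc
      _ = g * (n' * c) := by rw [hn']; ring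
    have hcop : Int.gcd n' d' = 1 := by
      have hc := Int.gcd_div_gcd_div_gcd (i := n) (j := d) (Int.gcd_pos_iff.2 (Or.inl (by omega)))
      rw [← hg] at hc
      have e1 : n / g = n' := by rw [hn', Int.mul_ediv_cancel_left _ hgpos.ne']
      have e2 : d / g = d' := by rw [hd', Int.mul_ediv_cancel_left _ hgpos.ne']
      rwa [e1, e2] at hc
    have hdvdji : n' ∣ ((j : Int) - i) := Int.dvd_of_dvd_mul_left_of_gcd_one hdvd' hcop
    have hle : n' ≤ (j : Int) - i := Int.le_of_dvd (by omega) hdvdji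
    omega
  set Lnat : Nat := L.toNat with hLnat
  have hLcast : (Lnat : Int) = L := Int.toNat_of_nonneg (by omega)
  have hinvA := cpLoop_inv n m d Lnat hn hd (by omega)
    (by rw [hLcast]; exact hcyc)
    (fun i j hij hj => hinj i j hij (by rw [← hLcast]; exact_mod_cast hj))
    (n.toNat + 1) 0 (by omega) (by omega)
  simp only [List.range_zero, List.map_nil, Nat.cast_zero, zero_mul, Int.zero_emod] at hinvA
  rw [show (PySem.Set.empty : PySem.Set Int) = ([] : List Int) from rfl, hinvA]
  rw [PySem.Int.floordiv_eq_ediv_of_pos hgpos, ← hL]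
  rw [PySem.List.pyRange_one, List.map_map]
  rw [show (L - 0).toNat = Lnat from by rw [hLnat]; omega]
  apply List.map_congr_left
  intro k _
  simp
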